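-- pv_equiv track=rewrite | github.com/roytian1992/ResearchForesight | src/researchworld/family_pipelines.py | lineage_ids
-- ===== SOURCE A (Python) =====
-- from typing import Any, Dict, Iterable, List, Tuple
--
-- def lineage_ids(node_id: str, parent_by_id: Dict[str, str | None]) -> List[str]:
--     chain: List[str] = []
--     current = str(node_id or "")
--     while current:
--         chain.append(current)
--         current = str(parent_by_id.get(current) or "")
--     chain.reverse()
--     return chain
-- ===== SOURCE B (Python) =====
-- def lineage_ids(node_id, parent_by_id):
--     # Stage 1: normalize every parent pointer once ("" for missing/None/empty).
--     nxt = {k: str(v or "") for k, v in parent_by_id.items()}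
--     # Stage 2: ancestors of parent, then self.
--     def up(cur):
--         return [] if not cur else up(nxt.get(cur, "")) + [cur]
--     return up(str(node_id or ""))
-- ===== Notes on version B (the rewrite author's own statement) =====
-- stated objective: alternative
-- what changed: Replaces the while-loop with append-and-final-reverse by a two-stage design: one preprocessing pass normalizes the whole parent map ('' for missing/None/empty), then a top-down recursion 'ancestors of parent, then self' builds the chain directly, with no accumulator and no reverse.
import Mathlib
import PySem

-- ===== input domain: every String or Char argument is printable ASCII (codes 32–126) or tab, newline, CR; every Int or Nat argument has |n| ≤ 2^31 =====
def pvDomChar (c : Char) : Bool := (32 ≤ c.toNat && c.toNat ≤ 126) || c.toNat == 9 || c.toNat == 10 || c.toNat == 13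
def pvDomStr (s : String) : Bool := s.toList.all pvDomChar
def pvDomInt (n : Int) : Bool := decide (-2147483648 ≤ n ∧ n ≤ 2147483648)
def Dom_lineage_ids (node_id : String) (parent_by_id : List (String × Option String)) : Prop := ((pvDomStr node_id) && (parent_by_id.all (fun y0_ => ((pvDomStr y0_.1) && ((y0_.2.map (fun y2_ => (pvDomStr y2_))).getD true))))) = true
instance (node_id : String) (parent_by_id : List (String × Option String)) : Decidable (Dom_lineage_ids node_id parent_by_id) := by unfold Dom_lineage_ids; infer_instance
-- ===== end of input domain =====

-- B restructures A's while-loop (append then final reverse) into a preprocessing pass that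
-- normalizes the parent map once, followed by a top-down "ancestors of parent, then self"
-- recursion with no accumulator and no reverse; same cost, different decomposition.


-- ===== PORT A =====
-- `str(parent_by_id.get(current) or "")`: missing key, None value or "" value all give ""
def pvStep (parent_by_id : List (String × Option String)) (cur : String) : String :=
  match (PySem.Dict.mk parent_by_id).get? cur with
  | some (some p) => if p = "" then "" else p
  | _ => ""

-- the while-loop with its `chain` accumulator and final reverse; fuel (parent_by_id.length + 1)
-- only makes it total — on a terminating walk "" is reached within that many steps
def lineage_idsLoop (parent_by_id : List (String × Option String)) :
    Nat → String → List String → List String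
  | 0, _, chain => chain.reverse
  | f + 1, cur, chain =>
      if cur = "" then chain.reverse
      else lineage_idsLoop parent_by_id f (pvStep parent_by_id cur) (chain ++ [cur])

def lineage_ids (node_id : String) (parent_by_id : List (String × Option String)) : List String :=
  lineage_idsLoop parent_by_id (parent_by_id.length + 1) (if node_id = "" then "" else node_id) []

-- ===== PORT B =====
-- Stage 1: the dict comprehension `{k: str(v or "") for k, v in parent_by_id.items()}`
def lineage_idsNorm (parent_by_id : List (String × Option String)) : List (String × String) :=
  parent_by_id.map (fun kv =>
    (kv.1, match kv.2 with
           | some v => if v = "" then "" else v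
           | none => ""))

-- Stage 2: the recursion `up`: ancestors of parent, then self (same totality fuel)
def lineage_idsUp (nxt : List (String × String)) : Nat → String → List String
  | 0, _ => []
  | f + 1, cur =>
      if cur = "" then []
      else lineage_idsUp nxt f ((PySem.Dict.mk nxt).getD cur "") ++ [cur]

def lineage_ids_alt (node_id : String) (parent_by_id : List (String × Option String)) : List String :=
  lineage_idsUp (lineage_idsNorm parent_by_id) (parent_by_id.length + 1)
    (if node_id = "" then "" else node_id)

-- ===== PRECONDITION & SPEC =====
def Spec_lineage_ids (node_id : String) (parent_by_id : List (String × Option String)) (out : List String) : Prop := out = lineage_ids_alt node_id parent_by_id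
instance (node_id : String) (parent_by_id : List (String × Option String)) (out : List String) : Decidable (Spec_lineage_ids node_id parent_by_id out) := by unfold Spec_lineage_ids; infer_instance

-- ===== CLAIM =====
def Claim_equal_lineage_ids : Prop := ∀ (node_id : String) (parent_by_id : List (String × Option String)), Dom_lineage_ids node_id parent_by_id → Spec_lineage_ids node_id parent_by_id (lineage_ids node_id parent_by_id)

-- ===== LEMMAS AND PROOFS =====
-- looking up the pre-normalized map is A's one-step expression
theorem getD_norm_eq_pvStep (parent_by_id : List (String × Option String)) (cur : String) :
    (PySem.Dict.mk (lineage_idsNorm parent_by_id)).getD cur "" = pvStep parent_by_id cur := by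
  induction parent_by_id with
  | nil => simp [lineage_idsNorm, pvStep, PySem.Dict.getD_eq_get?_getD, PySem.Dict.get?]
  | cons kv rest ih =>
      obtain ⟨k, v⟩ := kv
      by_cases h : k = cur
      · cases v <;>
          simp [lineage_idsNorm, pvStep, PySem.Dict.getD_eq_get?_getD,
            PySem.Dict.get?_mk_cons, h]
      · simpa [lineage_idsNorm, pvStep, PySem.Dict.getD_eq_get?_getD,
          PySem.Dict.get?_mk_cons, h] using ih

-- A's loop with accumulator `chain` equals B's recursion followed by the reversed accumulator,
-- for ANY fuel: both ports traverse the very same id sequence.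
theorem lineage_idsLoop_eq_up (parent_by_id : List (String × Option String)) :
    ∀ (f : Nat) (cur : String) (chain : List String),
      lineage_idsLoop parent_by_id f cur chain =
        lineage_idsUp (lineage_idsNorm parent_by_id) f cur ++ chain.reverse := by
  intro f
  induction f with
  | zero => intro cur chain; simp [lineage_idsLoop, lineage_idsUp]
  | succ f ih =>
      intro cur chain
      by_cases h : cur = ""
      · simp [lineage_idsLoop, lineage_idsUp, h]
      · simp [lineage_idsLoop, lineage_idsUp, h, ih, getD_norm_eq_pvStep]

-- ===== VERDICT =====
theorem lineage_ids_spec : Claim_equal_lineage_ids := by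
  intro node_id parent_by_id _
  unfold Spec_lineage_ids lineage_ids lineage_ids_alt
  simp [lineage_idsLoop_eq_up]
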